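-- pv_equiv track=rewrite | github.com/Ratty7198/MeshCore-HA-UI | custom_components/meshcore_ui/websocket_api.py | _find_sensor
-- ===== SOURCE A (Python) =====
-- from typing import Any
--
-- def _find_sensor(sensors: dict, suffixes: list[str]) -> Any:
--     """Find the first sensor whose entity_id ends with one of the given suffixes."""
--     for suffix in suffixes:
--         for eid, data in sensors.items():
--             if eid.endswith(suffix):
--                 val = data["state"]
--                 if val not in ("unknown", "unavailable", None, ""):
--                     return val
--     return None
-- ===== SOURCE B (Python) =====
-- def _find_sensor(sensors: dict, suffixes: list[str]):
--     """Find the first sensor whose entity_id ends with one of the given suffixes."""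
--     best_i = None
--     best_val = None
--     for eid, data in sensors.items():
--         val = data.get("state")
--         if val in ("unknown", "unavailable", None, ""):
--             continue
--         for i, suffix in enumerate(suffixes):
--             if eid.endswith(suffix):
--                 if best_i is None or i < best_i:
--                     best_i = i
--                     best_val = val
--                 break
--     return best_val
-- ===== Notes on version B (the rewrite author's own statement) =====
-- stated objective: alternative
-- what changed: Single pass over the sensors dict keeping the best (smallest) matching-suffix index seen so far, instead of re-scanning the whole sensors dict once per suffix.
-- outside the precondition, e.g. on _find_sensor({'b_x': {'state': '5'}, 'a_x': {}}, ['x']): A returns '5', B returns '5'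
import Mathlib
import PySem

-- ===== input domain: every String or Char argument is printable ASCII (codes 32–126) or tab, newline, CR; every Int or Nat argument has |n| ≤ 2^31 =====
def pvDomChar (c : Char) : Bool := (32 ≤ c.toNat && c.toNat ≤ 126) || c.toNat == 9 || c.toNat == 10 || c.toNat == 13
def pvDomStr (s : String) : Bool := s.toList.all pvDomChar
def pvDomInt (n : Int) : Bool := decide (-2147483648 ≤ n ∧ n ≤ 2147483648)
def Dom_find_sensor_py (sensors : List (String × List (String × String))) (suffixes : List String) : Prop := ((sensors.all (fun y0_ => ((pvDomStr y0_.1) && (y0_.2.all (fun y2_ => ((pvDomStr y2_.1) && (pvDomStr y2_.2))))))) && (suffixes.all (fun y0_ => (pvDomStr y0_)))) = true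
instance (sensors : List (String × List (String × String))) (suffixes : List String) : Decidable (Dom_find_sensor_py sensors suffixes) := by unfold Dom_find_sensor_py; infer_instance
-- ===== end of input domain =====

-- B replaces A's suffix-by-suffix rescans of the sensors dict with ONE pass over the sensors,
-- keeping the best (smallest) matching-suffix index seen so far (objective: alternative decomposition).

-- ===== PORT A =====
-- data["state"]: first-match lookup in the association list (Python dict keys are unique)
def pvLookup : List (String × String) → String → Option String
  | [], _ => none
  | (k, v) :: t, key => if k = key then some v else pvLookup t key

-- inner 'for eid, data in sensors.items()' loop of A for one suffix;
-- 'none' covers both "no sensor returned" and the KeyError on data["state"] (the latter is outside Pre_)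
def findA_inner (sensors : List (String × List (String × String))) (suffix : String) : Option String :=
  match sensors with
  | [] => none
  | (eid, data) :: rest =>
    if PySem.Str.endswith eid suffix then
      match pvLookup data "state" with
      | none => none
      | some val =>
        if val = "unknown" ∨ val = "unavailable" ∨ val = "" then findA_inner rest suffix
        else some val
    else findA_inner rest suffix

def find_sensor_py (sensors : List (String × List (String × String))) (suffixes : List String) : Option String :=
  match suffixes with
  | [] => none
  | s :: rest =>
    match findA_inner sensors s with
    | some v => some v
    | none => find_sensor_py sensors rest

-- ===== PORT B =====
-- 'for i, suffix in enumerate(suffixes): if eid.endswith(suffix): ... break'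
def pvMatchIdx (eid : String) : List String → Nat → Option Nat
  | [], _ => none
  | s :: rest, i => if PySem.Str.endswith eid s then some i else pvMatchIdx eid rest (i + 1)

-- single pass over sensors carrying (best_i, best_val)
def findB_go (suffixes : List String) :
    List (String × List (String × String)) → Option Nat → Option String → Option String
  | [], _, bv => bv
  | (eid, data) :: rest, bi, bv =>
    match pvLookup data "state" with
    | none => findB_go suffixes rest bi bv
    | some val =>
      if val = "unknown" ∨ val = "unavailable" ∨ val = "" then findB_go suffixes rest bi bv
      else
        match pvMatchIdx eid suffixes 0 with
        | none => findB_go suffixes rest bi bv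
        | some i =>
          match bi with
          | none => findB_go suffixes rest (some i) (some val)
          | some b =>
            if i < b then findB_go suffixes rest (some i) (some val)
            else findB_go suffixes rest bi bv

def find_sensor_py_alt (sensors : List (String × List (String × String))) (suffixes : List String) : Option String :=
  findB_go suffixes sensors none none

-- ===== PRECONDITION & SPEC =====
-- Pre_ excludes inputs where some sensor matching a suffix lacks the "state" key: A raises KeyError
-- when its scan reaches such a sensor, and returns there only by accident of scan order.
def Pre_find_sensor_py (sensors : List (String × List (String × String))) (suffixes : List String) : Prop :=
  ∀ p ∈ sensors, (∃ s ∈ suffixes, PySem.Str.endswith p.1 s = true) →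
    (p.2.any (fun kv => kv.1 == "state")) = true
instance (sensors : List (String × List (String × String))) (suffixes : List String) : Decidable (Pre_find_sensor_py sensors suffixes) := by unfold Pre_find_sensor_py; infer_instance

def pvWitness_find_sensor_py : (List (String × List (String × String))) × List String :=
  ([("sensor.a_snr", [("state", "12")])], ["_snr"])

def Spec_find_sensor_py (sensors : List (String × List (String × String))) (suffixes : List String) (out : Option String) : Prop := out = find_sensor_py_alt sensors suffixes
instance (sensors : List (String × List (String × String))) (suffixes : List String) (out : Option String) : Decidable (Spec_find_sensor_py sensors suffixes out) := by unfold Spec_find_sensor_py; infer_instance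

-- ===== CLAIM (what is proved, stated in full; the proofs are below) =====
def Claim_equal_find_sensor_py : Prop := ∀ (sensors : List (String × List (String × String))) (suffixes : List String), Dom_find_sensor_py sensors suffixes → Pre_find_sensor_py sensors suffixes → Spec_find_sensor_py sensors suffixes (find_sensor_py sensors suffixes)

-- ===== LEMMAS AND PROOFS =====

-- smallest index of a suffix that eid ends with
def pvMinIdx (eid : String) : List String → Option Nat
  | [] => none
  | s :: rest => if PySem.Str.endswith eid s then some 0 else (pvMinIdx eid rest).map (· + 1)

-- the sensor's state if present and valid
def pvValidOf (data : List (String × String)) : Option String :=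
  match pvLookup data "state" with
  | none => none
  | some v => if v = "unknown" ∨ v = "unavailable" ∨ v = "" then none else some v

-- the (suffix index, value) pairs of the valid, matching sensors, in dict order
def pvKeyed (sensors : List (String × List (String × String))) (suffixes : List String) : List (Nat × String) :=
  sensors.filterMap (fun p => (pvValidOf p.2).bind (fun v => (pvMinIdx p.1 suffixes).map (fun i => (i, v))))

-- first element with minimal first component
def pvPick : List (Nat × String) → Option (Nat × String)
  | [] => none
  | e :: t =>
    match pvPick t with
    | none => some e
    | some q => if q.1 < e.1 then some q else some e

def pvMerge : Option (Nat × String) → Option (Nat × String) → Option (Nat × String)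
  | none, q => q
  | some p, none => some p
  | some p, some q => if q.1 < p.1 then some q else some p

theorem pvMatchIdx_eq (eid : String) (suffs : List String) (k : Nat) :
    pvMatchIdx eid suffs k = (pvMinIdx eid suffs).map (· + k) := by
  induction suffs generalizing k with
  | nil => rfl
  | cons s rest ih =>
    simp only [pvMatchIdx, pvMinIdx, PySem.Str.endswith_eq]
    by_cases h : PySem.Chars.endswith eid.toList s.toList = true
    · simp [h]
    · simp only [if_neg h, ih (k + 1), Option.map_map]
      cases pvMinIdx eid rest <;> simp <;> omega

theorem pvPick_cons (e : Nat × String) (t : List (Nat × String)) :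
    pvPick (e :: t) = pvMerge (some e) (pvPick t) := by
  simp only [pvPick]; cases pvPick t <;> rfl

theorem pvMerge_assoc (p q r : Option (Nat × String)) :
    pvMerge (pvMerge p q) r = pvMerge p (pvMerge q r) := by
  rcases p with _ | ⟨a, x⟩ <;> rcases q with _ | ⟨b, y⟩ <;> rcases r with _ | ⟨c, z⟩ <;>
    simp only [pvMerge] <;> split_ifs <;> simp only [pvMerge] <;> split_ifs <;>
    first | rfl | (exfalso; omega)

theorem pvPick_zero (v : String) (t : List (Nat × String)) :
    pvPick ((0, v) :: t) = some (0, v) := by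
  rw [pvPick_cons]; cases h : pvPick t with
  | none => rfl
  | some q => simp [pvMerge]

theorem pvMerge_shift (a : Nat) (x : String) (q : Option (Nat × String)) :
    pvMerge (some (a + 1, x)) (q.map (fun p => (p.1 + 1, p.2))) =
      (pvMerge (some (a, x)) q).map (fun p => (p.1 + 1, p.2)) := by
  cases q with
  | none => rfl
  | some q => simp only [Option.map_some, pvMerge, Nat.add_lt_add_iff_right]; split_ifs <;> rfl

-- B's pass computes the merge of the accumulator with the pick over the keyed list
theorem findB_go_eq (suffixes : List String) (sensors : List (String × List (String × String)))
    (acc : Option (Nat × String)) :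
    findB_go suffixes sensors (acc.map Prod.fst) (acc.map Prod.snd) =
      (pvMerge acc (pvPick (pvKeyed sensors suffixes))).map Prod.snd := by
  induction sensors generalizing acc with
  | nil => cases acc <;> simp [findB_go, pvKeyed, pvPick, pvMerge]
  | cons p rest ih =>
    obtain ⟨eid, data⟩ := p
    simp only [findB_go, pvKeyed, List.filterMap_cons]
    cases hL : pvLookup data "state" with
    | none =>
      have hV : pvValidOf data = none := by simp [pvValidOf, hL]
      simpa [hV, pvKeyed] using ih acc
    | some v =>
      by_cases hI : v = "unknown" ∨ v = "unavailable" ∨ v = ""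
      · have hV : pvValidOf data = none := by simp [pvValidOf, hL, hI]
        simpa [hI, hV, pvKeyed] using ih acc
      · have hV : pvValidOf data = some v := by simp [pvValidOf, hL, hI]
        rw [pvMatchIdx_eq]
        cases hM : pvMinIdx eid suffixes with
        | none => simpa [hI, hV, pvKeyed] using ih acc
        | some i =>
          simp only [hV, Option.map_some, Option.bind_some, if_neg hI]
          rw [pvPick_cons, ← pvMerge_assoc]
          cases acc with
          | none =>
            have := ih (some (i, v))
            simpa [pvMerge, pvKeyed] using this
          | some b =>
            obtain ⟨bi, bv⟩ := b
            simp only [Option.map_some, pvMerge]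
            by_cases hlt : i < bi
            · simpa [hlt, pvMerge, pvKeyed] using ih (some (i, v))
            · simpa [hlt, pvMerge, pvKeyed] using ih (some (bi, bv))

theorem any_state_iff (d : List (String × String)) :
    (d.any (fun kv => kv.1 == "state")) = true ↔ pvLookup d "state" ≠ none := by
  induction d with
  | nil => simp [pvLookup]
  | cons kv t ih =>
    obtain ⟨k, v⟩ := kv
    by_cases h : k = "state" <;> simp [pvLookup, h, ih]

theorem pvKeyed_nil (sensors : List (String × List (String × String))) :
    pvKeyed sensors [] = [] := by
  induction sensors with
  | nil => rfl
  | cons p rest ih => simp [pvKeyed, pvMinIdx] at ih ⊢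

-- one outer iteration of A, characterised on the keyed list
theorem pick_cons_suffix (s : String) (rest : List String)
    (sensors : List (String × List (String × String)))
    (hPre : ∀ p ∈ sensors, (∃ t ∈ s :: rest, PySem.Str.endswith p.1 t = true) →
      (p.2.any (fun kv => kv.1 == "state")) = true) :
    pvPick (pvKeyed sensors (s :: rest)) =
      match findA_inner sensors s with
      | some v => some (0, v)
      | none => (pvPick (pvKeyed sensors rest)).map (fun p => (p.1 + 1, p.2)) := by
  induction sensors with
  | nil => simp [pvKeyed, pvPick, findA_inner]
  | cons p tail ih =>
    obtain ⟨eid, data⟩ := p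
    have hPre' : ∀ q ∈ tail, (∃ t ∈ s :: rest, PySem.Str.endswith q.1 t = true) →
        (q.2.any (fun kv => kv.1 == "state")) = true :=
      fun q hq => hPre q (List.mem_cons_of_mem _ hq)
    by_cases hE : PySem.Chars.endswith eid.toList s.toList = true
    · -- matched by s: Pre gives the state key
      have hEs : PySem.Str.endswith eid s = true := by
        rw [PySem.Str.endswith_eq]; exact hE
      have hAny : (data.any (fun kv => kv.1 == "state")) = true :=
        hPre (eid, data) (List.mem_cons_self) ⟨s, List.mem_cons_self, hEs⟩
      obtain ⟨v, hL⟩ : ∃ v, pvLookup data "state" = some v := by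
        rcases h : pvLookup data "state" with _ | v
        · exact absurd h ((any_state_iff data).mp hAny)
        · exact ⟨v, rfl⟩
      by_cases hI : v = "unknown" ∨ v = "unavailable" ∨ v = ""
      · have hV : pvValidOf data = none := by simp [pvValidOf, hL, hI]
        simp only [findA_inner, PySem.Str.endswith_eq, if_pos hE, hL, if_pos hI]
        simpa [pvKeyed, hV] using ih hPre'
      · have hV : pvValidOf data = some v := by simp [pvValidOf, hL, hI]
        have hM : pvMinIdx eid (s :: rest) = some 0 := by
          simp [pvMinIdx, PySem.Str.endswith_eq, hE]
        simp only [findA_inner, PySem.Str.endswith_eq, if_pos hE, hL, if_neg hI]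
        simp only [pvKeyed, List.filterMap_cons, hV, hM, Option.bind_some, Option.map_some]
        exact pvPick_zero v _
    · -- not matched by s
      simp only [findA_inner, PySem.Str.endswith_eq, if_neg hE]
      have hM : pvMinIdx eid (s :: rest) = (pvMinIdx eid rest).map (· + 1) := by
        simp [pvMinIdx, PySem.Str.endswith_eq, hE]
      cases hV : pvValidOf data with
      | none =>
        simp only [pvKeyed, List.filterMap_cons, hV, Option.bind_none]
        simpa [pvKeyed] using ih hPre'
      | some v =>
        cases hMr : pvMinIdx eid rest with
        | none =>
          simp only [pvKeyed, List.filterMap_cons, hV, hM, hMr, Option.bind_some,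
            Option.map_none]
          simpa [pvKeyed] using ih hPre'
        | some j =>
          simp only [pvKeyed, List.filterMap_cons, hV, hM, hMr, Option.bind_some,
            Option.map_some]
          rw [pvPick_cons]
          have ihv := ih hPre'
          simp only [pvKeyed] at ihv
          rw [ihv]
          cases hA : findA_inner tail s with
          | some w =>
            simp only [pvMerge]
            have : (0 : Nat) < j + 1 := Nat.succ_pos j
            simp [this]
          | none =>
            simp only []
            rw [pvMerge_shift j v, ← pvPick_cons]
  
-- A equals the pick over the keyed list
theorem findA_eq (suffixes : List String) (sensors : List (String × List (String × String)))
    (hPre : ∀ p ∈ sensors, (∃ t ∈ suffixes, PySem.Str.endswith p.1 t = true) →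
      (p.2.any (fun kv => kv.1 == "state")) = true) :
    find_sensor_py sensors suffixes = (pvPick (pvKeyed sensors suffixes)).map Prod.snd := by
  induction suffixes with
  | nil => simp [find_sensor_py, pvKeyed_nil, pvPick]
  | cons s rest ih =>
    have hPre' : ∀ p ∈ sensors, (∃ t ∈ rest, PySem.Str.endswith p.1 t = true) →
        (p.2.any (fun kv => kv.1 == "state")) = true :=
      fun p hp ⟨t, ht, he⟩ => hPre p hp ⟨t, List.mem_cons_of_mem _ ht, he⟩
    rw [pick_cons_suffix s rest sensors hPre]
    cases hA : findA_inner sensors s with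
    | some v => simp [find_sensor_py, hA]
    | none =>
      simp only [find_sensor_py, hA, ih hPre', Option.map_map]
      cases pvPick (pvKeyed sensors rest) <;> rfl

-- ===== VERDICT (by name: the statement is the Claim_ definition above) =====
theorem find_sensor_py_spec : Claim_equal_find_sensor_py := by
  intro sensors suffixes _hDom hPre
  unfold Spec_find_sensor_py find_sensor_py_alt
  have hB := findB_go_eq suffixes sensors none
  simp only [Option.map_none, pvMerge] at hB
  rw [hB]
  exact findA_eq suffixes sensors hPre
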